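-- pv_equiv track=rewrite | github.com/deus-mouse/Knowledge_Base | 2_Алгоритмы/yandex/course/3/3.2.py | foo1
-- ===== SOURCE A (Python) =====
-- def foo1(dictionary, text):
--     goodwords = set(dictionary)
--     for word in dictionary:
--         for delpos in range(len(word)):
--             goodwords.add(word[:delpos] + word[delpos+1:])
--     ans = []
--     for word in text:
--         ans.append(word) if word in goodwords else None
--     return ans
-- ===== SOURCE B (Python) =====
-- def foo1(dictionary, text):
--     dictset = set(dictionary)
--     res = []
--     for word in text:
--         if word in dictset or any(
--             len(d) == len(word) + 1
--             and any(d[:i] + d[i + 1:] == word for i in range(len(d)))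
--             for d in dictionary
--         ):
--             res.append(word)
--     return res
-- ===== Notes on version B (the rewrite author's own statement) =====
-- stated objective: alternative
-- what changed: Instead of precomputing the set of all one-deletion variants of every dictionary word, B keeps only the exact-match set and, for a text word not in it, scans dictionary words of length len(word)+1 checking whether deleting one character yields the word.
import Mathlib
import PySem

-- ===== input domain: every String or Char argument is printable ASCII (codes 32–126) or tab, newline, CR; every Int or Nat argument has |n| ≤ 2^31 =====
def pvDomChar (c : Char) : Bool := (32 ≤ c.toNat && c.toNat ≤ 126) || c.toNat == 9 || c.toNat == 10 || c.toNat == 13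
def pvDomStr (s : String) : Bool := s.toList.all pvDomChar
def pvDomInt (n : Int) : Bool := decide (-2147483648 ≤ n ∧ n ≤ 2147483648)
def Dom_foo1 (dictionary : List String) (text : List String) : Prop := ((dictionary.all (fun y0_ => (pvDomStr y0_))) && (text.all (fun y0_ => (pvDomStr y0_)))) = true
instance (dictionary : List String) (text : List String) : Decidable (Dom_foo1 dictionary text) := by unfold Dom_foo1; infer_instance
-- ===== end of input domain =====

-- B does the same filtering as A but WITHOUT precomputing the one-deletion variant set:
-- exact matches via set(dictionary); otherwise scan dictionary words of length len(word)+1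
-- and test each one-character deletion directly (objective: alternative, same results).

-- shared helper: the Python expression w[:i] + w[i+1:] (both Source A and Source B compute it verbatim)
def delAt (w : String) (i : Int) : String :=
  PySem.Str.slice w none (some i) ++ PySem.Str.slice w (some (i + 1)) none

-- ===== PORT A =====
def foo1 (dictionary : List String) (text : List String) : List String :=
  let goodwords0 : PySem.Set String := PySem.Set.ofList dictionary
  let goodwords : PySem.Set String :=
    dictionary.foldl (fun g w =>
      (PySem.List.pyRange 0 (PySem.Str.len w) 1).foldl
        (fun g delpos => PySem.Set.add g (delAt w delpos)) g) goodwords0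
  text.foldl (fun ans word =>
    if PySem.Set.contains goodwords word then ans ++ [word] else ans) []

-- ===== PORT B =====
def foo1_alt (dictionary : List String) (text : List String) : List String :=
  let dictset : PySem.Set String := PySem.Set.ofList dictionary
  text.foldl (fun res word =>
    if PySem.Set.contains dictset word ||
        dictionary.any (fun d =>
          (PySem.Str.len d == PySem.Str.len word + 1) &&
          (PySem.List.pyRange 0 (PySem.Str.len d) 1).any (fun i => delAt d i == word))
    then res ++ [word] else res) []

-- ===== PRECONDITION & SPEC =====
def Spec_foo1 (dictionary : List String) (text : List String) (out : List String) : Prop := out = foo1_alt dictionary text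
instance (dictionary : List String) (text : List String) (out : List String) : Decidable (Spec_foo1 dictionary text out) := by unfold Spec_foo1; infer_instance

-- ===== CLAIM (what is proved, stated in full; the proofs are below) =====
def Claim_equal_foo1 : Prop := ∀ (dictionary : List String) (text : List String), Dom_foo1 dictionary text → Spec_foo1 dictionary text (foo1 dictionary text)

-- ===== LEMMAS AND PROOFS =====

-- membership after folding `add (f i)` over a list
theorem mem_foldl_add {α : Type} (f : α → String) (l : List α) (g : PySem.Set String) (x : String) :
    x ∈ l.foldl (fun g i => PySem.Set.add g (f i)) g ↔ x ∈ g ∨ ∃ i ∈ l, f i = x := by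
  induction l generalizing g with
  | nil => simp
  | cons a l ih =>
    simp [List.foldl_cons, ih, PySem.Set.mem_add]
    tauto

-- membership in A's goodwords set
theorem mem_goodwords (dictionary : List String) (g : PySem.Set String) (x : String) :
    x ∈ dictionary.foldl (fun g w =>
        (PySem.List.pyRange 0 (PySem.Str.len w) 1).foldl
          (fun g delpos => PySem.Set.add g (delAt w delpos)) g) g
      ↔ x ∈ g ∨ ∃ w ∈ dictionary, ∃ i ∈ PySem.List.pyRange 0 (PySem.Str.len w) 1, delAt w i = x := by
  induction dictionary generalizing g with
  | nil => simp
  | cons w l ih =>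
    rw [List.foldl_cons, ih, mem_foldl_add]
    simp only [List.mem_cons, exists_eq_or_imp]
    exact or_assoc

-- deleting one character of w (at a valid index) shortens it by exactly one
theorem len_delAt (w : String) (i : Int) (h0 : 0 ≤ i) (h1 : i < (w.toList.length : Int)) :
    (delAt w i).toList.length + 1 = w.toList.length := by
  have hfrom := PySem.List.slice_from w.toList (a := i + 1) (by omega)
  have : (delAt w i).toList = w.toList.take i.toNat ++ w.toList.drop (i + 1).toNat := by
    simp [delAt, PySem.Str.toList_slice, PySem.Chars.slice_eq_listSlice,
      PySem.List.slice_to w.toList h0, hfrom]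
  rw [this]
  simp only [List.length_append, List.length_take, List.length_drop]
  omega

-- the two membership tests agree
theorem pred_eq (dictionary : List String) (word : String) :
    PySem.Set.contains
      (dictionary.foldl (fun g w =>
        (PySem.List.pyRange 0 (PySem.Str.len w) 1).foldl
          (fun g delpos => PySem.Set.add g (delAt w delpos)) g)
        (PySem.Set.ofList dictionary)) word
    = (PySem.Set.contains (PySem.Set.ofList dictionary) word ||
        dictionary.any (fun d =>
          (PySem.Str.len d == PySem.Str.len word + 1) &&
          (PySem.List.pyRange 0 (PySem.Str.len d) 1).any (fun i => delAt d i == word))) := by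
  rw [Bool.eq_iff_iff]
  rw [PySem.Set.contains_iff, mem_goodwords]
  simp only [Bool.or_eq_true, PySem.Set.contains_iff, List.any_eq_true, Bool.and_eq_true,
    beq_iff_eq]
  constructor
  · rintro (h | ⟨d, hd, i, hi, he⟩)
    · exact Or.inl h
    · refine Or.inr ⟨d, hd, ?_, i, hi, he⟩
      rw [PySem.List.mem_pyRange_one, PySem.Str.len_eq] at hi
      have := len_delAt d i hi.1 hi.2
      rw [he] at this
      simp only [PySem.Str.len_eq]
      omega
  · rintro (h | ⟨d, hd, _, i, hi, he⟩)
    · exact Or.inl h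
    · exact Or.inr ⟨d, hd, i, hi, he⟩

-- ===== VERDICT (by name: the statement is the Claim_ definition above) =====
theorem foo1_spec : Claim_equal_foo1 := by
  intro dictionary text hdom
  clear hdom
  unfold Spec_foo1 foo1 foo1_alt
  simp only []
  induction text using List.reverseRecOn with
  | nil => rfl
  | append_singleton l w ih =>
    rw [List.foldl_append, List.foldl_append, ih]
    simp only [List.foldl_cons, List.foldl_nil, pred_eq]
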